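-- pv_equiv track=rewrite | github.com/adienes/remainder-tree | integer_mockup.py | remainder_tree
-- ===== SOURCE A (Python) =====
-- def remainder_tree(A, m):
-- 	N = len(A)
-- 	assert N == len(m)
--
-- 	if N == 0: #shouldn't really ever occur but this handles weird cases
-- 		return []
--
-- 	#base case for recursion
-- 	if N == 1:
-- 		return [A[0]%m[0]]
--
--
-- 	#otherwise, pair the first element with Id, and then every successive second element
-- 	#the C_i are recovered by either taking a mod, or multiplying then taking a mod
-- 	#it will 'complete' the binary tree so rounds up to nearest power of 2
--
--
-- 	p_m = []
-- 	for i in range(0,N,2):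
-- 		try:
-- 			p_m.append(m[i]*m[i+1])
--
-- 		except IndexError:
-- 			p_m.append(m[i]) #only occurs at the end when N is odd
--
-- 	p_A = [A[0]] #careful of mutability issue here
-- 	for i in range(1, N-1, 2):
-- 		p_A.append(A[i]*A[i+1])
--
--
-- 	p_C = remainder_tree(p_A, p_m)
--
-- 	#print ("Traversing up to r(", p_A,",", p_m, ")")
-- 	#print ("Found the answer as ", p_C)
--
--
-- 	C = []
-- 	for i in range(N):
-- 		parent = p_C[i//2]
--
-- 		if i%2 == 0:
-- 			C.append(parent%m[i])
--
-- 		if i%2 == 1: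
-- 			C.append((parent*A[i])%m[i])
--
-- 		#print ("Now returning: ", C)
-- 		#print ()
-- 	return C
-- ===== SOURCE B (Python) =====
-- def remainder_tree(A, m):
-- 	assert len(A) == len(m)
-- 	C = []
-- 	prod = 1
-- 	for a, mi in zip(A, m):
-- 		prod *= a
-- 		C.append(prod % mi)
-- 	return C
-- ===== Notes on version B (the rewrite author's own statement) =====
-- stated objective: simpler
-- what changed: Replaces the recursive binary remainder tree (pairing elements and moduli, recursing on the halved lists, then redistributing parent remainders) with one linear pass keeping a running unreduced prefix product and reducing it by each modulus, valid over integers since reducing modulo a multiple of m[i] and then modulo m[i] equals reducing modulo m[i]; on very long lists the unreduced prefix product grows, so B trades A's early modular reduction for brevity and is slower there.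
import Mathlib
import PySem

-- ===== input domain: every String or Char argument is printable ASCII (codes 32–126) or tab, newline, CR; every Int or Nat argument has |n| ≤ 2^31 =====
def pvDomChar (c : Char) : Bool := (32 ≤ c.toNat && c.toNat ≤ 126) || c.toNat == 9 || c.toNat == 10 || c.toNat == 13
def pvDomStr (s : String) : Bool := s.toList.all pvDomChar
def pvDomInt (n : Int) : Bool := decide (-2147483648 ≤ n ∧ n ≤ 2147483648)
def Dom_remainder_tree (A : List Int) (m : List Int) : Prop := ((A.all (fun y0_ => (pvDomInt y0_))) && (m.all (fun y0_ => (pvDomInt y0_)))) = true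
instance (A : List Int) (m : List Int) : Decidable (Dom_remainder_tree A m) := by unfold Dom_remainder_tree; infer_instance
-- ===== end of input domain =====

-- B replaces the recursive binary remainder tree with one linear pass keeping a running
-- prefix product reduced by each modulus (simpler; exact over the integers).
def rtPmEntry (m : List Int) (i : Int) : Int :=
  match PySem.List.pyGet? m (i + 1) with
  | some v => PySem.List.pyGetD m i 0 * v
  | none => PySem.List.pyGetD m i 0

def remainder_tree (A : List Int) (m : List Int) : List Int :=
  let N := A.length
  if hN0 : N = 0 then []
  else if hN1 : N = 1 then [PySem.Int.mod (PySem.List.pyGetD A 0 0) (PySem.List.pyGetD m 0 0)]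
  else
    let p_m := (PySem.List.pyRange 0 (N : Int) 2).foldl
      (fun acc i => acc ++ [rtPmEntry m i]) []
    let p_A := (PySem.List.pyRange 1 ((N : Int) - 1) 2).foldl
      (fun acc i => acc ++ [PySem.List.pyGetD A i 0 * PySem.List.pyGetD A (i + 1) 0])
      [PySem.List.pyGetD A 0 0]
    let p_C := remainder_tree p_A p_m
    (PySem.List.pyRange 0 (N : Int) 1).foldl
      (fun acc i =>
        let parent := PySem.List.pyGetD p_C (PySem.Int.floordiv i 2) 0
        let acc1 := if PySem.Int.mod i 2 = 0
          then acc ++ [PySem.Int.mod parent (PySem.List.pyGetD m i 0)] else acc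
        if PySem.Int.mod i 2 = 1
          then acc1 ++ [PySem.Int.mod (parent * PySem.List.pyGetD A i 0) (PySem.List.pyGetD m i 0)]
          else acc1) []
termination_by A.length
decreasing_by
  simp only [PySem.List.foldl_append_singleton_eq_map,
    PySem.List.pyRange_of_pos _ _ (by norm_num : (0:Int) < 2)]
  simp only [List.length_append, List.length_map, List.length_range, List.length_cons,
    List.length_nil]
  split <;> omega


-- ===== PORT B =====
def remainder_tree_alt (A : List Int) (m : List Int) : List Int :=
  ((A.zip m).foldl
    (fun (s : List Int × Int) am =>
      let prod := s.2 * am.1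
      (s.1 ++ [PySem.Int.mod prod am.2], prod))
    ([], 1)).1

-- ===== PRECONDITION & SPEC =====
-- Pre_ excludes exactly the inputs where A raises: mismatched lengths (AssertionError)
-- and a zero modulus (ZeroDivisionError); B raises there too.
def Pre_remainder_tree (A : List Int) (m : List Int) : Prop :=
  A.length = m.length ∧ ∀ x ∈ m, x ≠ 0
instance (A : List Int) (m : List Int) : Decidable (Pre_remainder_tree A m) := by
  unfold Pre_remainder_tree; infer_instance

def pvWitness_remainder_tree : List Int × List Int := ([2, -3, 4, 5, 6], [7, 5, -9, 4, 11])

def Spec_remainder_tree (A : List Int) (m : List Int) (out : List Int) : Prop := out = remainder_tree_alt A m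
instance (A : List Int) (m : List Int) (out : List Int) : Decidable (Spec_remainder_tree A m out) := by unfold Spec_remainder_tree; infer_instance

-- ===== CLAIM (what is proved, stated in full; the proofs are below) =====
def Claim_equal_remainder_tree : Prop := ∀ (A : List Int) (m : List Int), Dom_remainder_tree A m → Pre_remainder_tree A m → Spec_remainder_tree A m (remainder_tree A m)

-- ===== LEMMAS AND PROOFS =====

def prefProd (A : List Int) (i : Nat) : Int := (A.take (i + 1)).prod

-- step-2 range conversions
lemma range2_zero (N : Nat) (h : 2 ≤ N) :
    PySem.List.pyRange 0 (N : Int) 2 = (List.range ((N+1)/2)).map (fun k => ((2*k : Nat) : Int)) := by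
  rw [PySem.List.pyRange_of_pos _ _ (by norm_num : (0:Int) < 2)]
  rw [if_pos (by exact_mod_cast Nat.pos_of_ne_zero (by omega))]
  have : (((N:Int) - 0 + 2 - 1) / 2).toNat = (N+1)/2 := by omega
  rw [this]
  apply List.map_congr_left; intro k _; push_cast; ring

lemma range2_one (N : Nat) (h : 2 ≤ N) :
    PySem.List.pyRange 1 ((N : Int) - 1) 2 = (List.range ((N-1)/2)).map (fun k => ((2*k+1 : Nat) : Int)) := by
  rw [PySem.List.pyRange_of_pos _ _ (by norm_num : (0:Int) < 2)]
  by_cases h3 : 3 ≤ N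
  · rw [if_pos (by omega)]
    have : (((N:Int) - 1 - 1 + 2 - 1) / 2).toNat = (N-1)/2 := by omega
    rw [this]
    apply List.map_congr_left; intro k _; push_cast; ring
  · rw [if_neg (by omega)]
    have : (N-1)/2 = 0 := by omega
    simp [this]

lemma getD_mem (m : List Int) (i : Nat) (h : i < m.length) : m.getD i 0 ∈ m := by
  rw [List.getD_eq_getElem m 0 h]; exact List.getElem_mem h

lemma pm_entry (m : List Int) (k : Nat) :
    rtPmEntry m ((2*k : Nat) : Int) =
      if 2*k+1 < m.length then m.getD (2*k) 0 * m.getD (2*k+1) 0 else m.getD (2*k) 0 := by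
  unfold rtPmEntry
  have : ((2*k : Nat) : Int) + 1 = ((2*k+1 : Nat) : Int) := by push_cast; ring
  rw [this, PySem.List.pyGet?_natCast, PySem.List.pyGetD_natCast]
  by_cases h : 2*k+1 < m.length
  · rw [List.getElem?_eq_getElem h, if_pos h]
    simp [List.getD_eq_getElem?_getD, List.getElem?_eq_getElem h]
  · rw [List.getElem?_eq_none (by omega), if_neg h]

lemma prefProd_zero (A : List Int) (h : A ≠ []) : prefProd A 0 = A.getD 0 0 := by
  cases A with
  | nil => simp at h
  | cons a A' => simp [prefProd]

lemma prefProd_succ (X : List Int) (i : Nat) (h : i + 1 < X.length) :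
    prefProd X (i + 1) = prefProd X i * X.getD (i + 1) 0 := by
  unfold prefProd
  rw [List.prod_take_succ _ _ h]
  simp [List.getD_eq_getElem?_getD, List.getElem?_eq_getElem h]

lemma foldl_step_map {α : Type} (step : List Int → α → List Int) (F : α → Int) (l : List α)
    (h : ∀ acc i, i ∈ l → step acc i = acc ++ [F i]) :
    ∀ acc, l.foldl step acc = acc ++ l.map F := by
  induction l with
  | nil => simp
  | cons x xs ih =>
    intro acc
    simp only [List.foldl_cons, List.map_cons]
    rw [h acc x (by simp), ih (fun acc i hi => h acc i (by simp [hi]))]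
    simp


def pmList (m : List Int) (K : Nat) : List Int :=
  (List.range K).map (fun j => if 2*j+1 < m.length then m.getD (2*j) 0 * m.getD (2*j+1) 0 else m.getD (2*j) 0)

def paList (A : List Int) (K1 : Nat) : List Int :=
  A.getD 0 0 :: (List.range K1).map (fun j => A.getD (2*j+1) 0 * A.getD (2*j+2) 0)

lemma getD_map_range' (f : Nat → Int) (n k : Nat) (h : k < n) :
    ((List.range n).map f).getD k 0 = f k := by
  simp [List.getD_eq_getElem?_getD, h]

lemma pa_prefProd (A : List Int) (h2 : 2 ≤ A.length) :
    ∀ j, j < (A.length+1)/2 → prefProd (paList A ((A.length-1)/2)) j = prefProd A (2*j) := by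
  intro j
  induction j with
  | zero =>
    intro _
    rw [prefProd_zero _ (by simp [paList]), prefProd_zero _ (by intro hA; simp [hA] at h2)]
    simp [paList]
  | succ j ihj =>
    intro hj
    have hlen : (paList A ((A.length-1)/2)).length = (A.length-1)/2 + 1 := by simp [paList]
    rw [prefProd_succ _ j (by rw [hlen]; omega)]
    have hget : (paList A ((A.length-1)/2)).getD (j+1) 0 = A.getD (2*j+1) 0 * A.getD (2*j+2) 0 := by
      show ((List.range ((A.length-1)/2)).map _).getD j 0 = _
      rw [getD_map_range' _ _ j (by omega)]
    rw [hget, ihj (by omega)]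
    have e1 : 2*(j+1) = (2*j+1) + 1 := by ring
    rw [e1, prefProd_succ _ (2*j+1) (by omega)]
    have e2 : 2*j+1 = (2*j) + 1 := rfl
    rw [e2, prefProd_succ _ (2*j) (by omega)]
    ring


lemma pymod_congr (a a' b : Int) (hb : b ≠ 0) (h : b ∣ a - a') :
    PySem.Int.mod a b = PySem.Int.mod a' b := by
  have h1 := PySem.Int.floordiv_mul_add_mod a b
  have h2 := PySem.Int.floordiv_mul_add_mod a' b
  have hd : b ∣ (PySem.Int.mod a b - PySem.Int.mod a' b) := by
    obtain ⟨u, hu⟩ := h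
    exact ⟨u - PySem.Int.floordiv a b + PySem.Int.floordiv a' b, by linarith [hu]⟩
  have hz : PySem.Int.mod a b - PySem.Int.mod a' b = 0 := by
    apply Int.eq_zero_of_abs_lt_dvd ((abs_dvd b _).mpr hd)
    rcases lt_or_gt_of_ne hb with hneg | hpos
    · have b1 := PySem.Int.mod_neg_bounds a hneg
      have b2 := PySem.Int.mod_neg_bounds a' hneg
      rw [abs_lt, abs_of_neg hneg]; omega
    · have b1 := PySem.Int.mod_nonneg a hpos
      have b2 := PySem.Int.mod_lt a hpos
      have b3 := PySem.Int.mod_nonneg a' hpos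
      have b4 := PySem.Int.mod_lt a' hpos
      rw [abs_lt, abs_of_pos hpos]; omega
  omega

lemma pymod_mod_of_dvd (a b M : Int) (hb : b ≠ 0) (h : b ∣ M) :
    PySem.Int.mod (PySem.Int.mod a M) b = PySem.Int.mod a b := by
  apply pymod_congr _ _ _ hb
  have h1 := PySem.Int.floordiv_mul_add_mod a M
  exact Dvd.dvd.trans h ⟨-(PySem.Int.floordiv a M), by linarith⟩

lemma pymod_mul_mod_of_dvd (a c b M : Int) (hb : b ≠ 0) (h : b ∣ M) :
    PySem.Int.mod (PySem.Int.mod a M * c) b = PySem.Int.mod (a * c) b := by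
  apply pymod_congr _ _ _ hb
  have h1 := PySem.Int.floordiv_mul_add_mod a M
  have heq : PySem.Int.mod a M * c - a * c = M * (-(PySem.Int.floordiv a M) * c) := by
    have : PySem.Int.mod a M = a - PySem.Int.floordiv a M * M := by linarith
    rw [this]; ring
  rw [heq]
  exact Dvd.dvd.mul_right h _

lemma a_char (N : Nat) : ∀ (A m : List Int), A.length = N → m.length = N →
    (∀ x ∈ m, x ≠ 0) →
    remainder_tree A m =
      (List.range N).map (fun i => PySem.Int.mod (prefProd A i) (m.getD i 0)) := by
  induction N using Nat.strong_induction_on with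
  | _ N ih =>
  intro A m hA hm hnz
  by_cases h0 : N = 0
  · subst h0
    rw [remainder_tree]
    simp [hA]
  by_cases h1 : N = 1
  · subst h1
    cases A with
    | nil => simp at hA
    | cons a A' =>
      cases m with
      | nil => simp at hm
      | cons mi m' =>
        have hA' : A' = [] := by simpa using hA
        have hm' : m' = [] := by simpa using hm
        subst hA'; subst hm'
        rw [remainder_tree]
        simp [prefProd, PySem.List.pyGetD_zero_cons]
  -- main case : 2 ≤ N
  have h2 : 2 ≤ N := by omega
  subst hA
  rw [remainder_tree]
  simp only [dif_neg h0, dif_neg h1]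
  simp only [PySem.List.foldl_append_singleton_eq_map, List.nil_append]
  rw [range2_zero _ h2, range2_one _ h2]
  simp only [List.map_map]
  have hpm : List.map ((rtPmEntry m) ∘ (fun k : Nat => ((2*k : Nat) : Int))) (List.range ((A.length+1)/2))
      = pmList m ((A.length+1)/2) := by
    unfold pmList
    apply List.map_congr_left
    intro k _
    simp only [Function.comp_apply]
    rw [pm_entry]
  have hpa : [PySem.List.pyGetD A 0 0] ++ List.map ((fun i => PySem.List.pyGetD A i 0 * PySem.List.pyGetD A (i+1) 0) ∘ (fun k : Nat => ((2*k+1 : Nat) : Int))) (List.range ((A.length-1)/2))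
      = paList A ((A.length-1)/2) := by
    unfold paList
    rw [List.singleton_append]
    congr 1
    · rw [PySem.List.pyGetD_zero]
    · apply List.map_congr_left
      intro k _
      simp only [Function.comp_apply]
      have e1 : ((2*k+1 : Nat) : Int) + 1 = ((2*k+2 : Nat) : Int) := by push_cast; ring
      rw [e1, PySem.List.pyGetD_natCast, PySem.List.pyGetD_natCast]
  rw [hpm, hpa]
  have hKeq : (A.length-1)/2 + 1 = (A.length+1)/2 := by omega
  have hPC := ih ((A.length+1)/2) (by omega) (paList A ((A.length-1)/2)) (pmList m ((A.length+1)/2))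
      (by simp [paList]; omega) (by simp [pmList]) (by
        intro x hx
        unfold pmList at hx
        simp only [List.mem_map, List.mem_range] at hx
        obtain ⟨j, hj, rfl⟩ := hx
        have hj2 : 2*j < m.length := by omega
        split
        · next hcond => exact mul_ne_zero (hnz _ (getD_mem m _ hj2)) (hnz _ (getD_mem m _ hcond))
        · exact hnz _ (getD_mem m _ hj2))
  rw [hPC]
  set PC := List.map (fun j => PySem.Int.mod (prefProd (paList A ((A.length-1)/2)) j) ((pmList m ((A.length+1)/2)).getD j 0)) (List.range ((A.length+1)/2)) with hPCdef
  rw [foldl_step_map _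
      (fun i => if PySem.Int.mod i 2 = 0
        then PySem.Int.mod (PySem.List.pyGetD PC (PySem.Int.floordiv i 2) 0) (PySem.List.pyGetD m i 0)
        else PySem.Int.mod (PySem.List.pyGetD PC (PySem.Int.floordiv i 2) 0 * PySem.List.pyGetD A i 0) (PySem.List.pyGetD m i 0)) _
      (by
        intro acc i _
        rcases PySem.Int.mod_two_eq i with h | h <;> simp only [h] <;> norm_num)
      []]
  rw [List.nil_append, PySem.List.pyRange_one, List.map_map]
  apply List.map_congr_left
  intro k hk
  rw [List.mem_range] at hk
  simp only [Function.comp_apply, zero_add]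
  have hkN : k < A.length := by omega
  have hdiv : PySem.Int.floordiv ((k:Int)) 2 = ((k/2 : Nat) : Int) := by
    rw [PySem.Int.floordiv_eq_ediv_of_pos (by norm_num)]; omega
  have hmod : PySem.Int.mod ((k:Int)) 2 = ((k % 2 : Nat) : Int) := by
    rw [PySem.Int.mod_eq_emod_of_pos (by norm_num)]; omega
  rw [hdiv, hmod, PySem.List.pyGetD_natCast, PySem.List.pyGetD_natCast, PySem.List.pyGetD_natCast]
  have hk2K : k/2 < (A.length+1)/2 := by omega
  rw [hPCdef, getD_map_range' _ _ _ hk2K]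
  rw [pa_prefProd A h2 (k/2) hk2K]
  have hpmget : (pmList m ((A.length+1)/2)).getD (k/2) 0 =
      if 2*(k/2)+1 < m.length then m.getD (2*(k/2)) 0 * m.getD (2*(k/2)+1) 0 else m.getD (2*(k/2)) 0 := by
    unfold pmList; rw [getD_map_range' _ _ _ hk2K]
  rw [hpmget]
  have hmknz : m.getD k 0 ≠ 0 := hnz _ (getD_mem m k (by omega))
  rcases Nat.even_or_odd k with he | ho
  · have hk20 : k % 2 = 0 := Nat.even_iff.mp he
    have h2k : 2*(k/2) = k := by omega
    rw [hk20, h2k, if_pos (by norm_num)]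
    split
    · exact pymod_mod_of_dvd _ _ _ hmknz (dvd_mul_right _ _)
    · exact pymod_mod_of_dvd _ _ _ hmknz dvd_rfl
  · have hk21 : k % 2 = 1 := Nat.odd_iff.mp ho
    have h2k : 2*(k/2) = k - 1 := by omega
    rw [hk21, h2k, if_neg (by norm_num), if_pos (by omega : k-1+1 < m.length),
      show k-1+1 = k from by omega]
    rw [pymod_mul_mod_of_dvd _ _ _ _ hmknz (dvd_mul_left _ _)]
    have hpp : prefProd A k = prefProd A (k-1) * A.getD (k-1+1) 0 := by
      conv_lhs => rw [show k = k-1+1 from by omega]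
      rw [prefProd_succ _ _ (by omega)]
    rw [hpp, show k-1+1 = k from by omega]


lemma alt_go (A : List Int) : ∀ (m : List Int), A.length = m.length → ∀ (p : Int) (acc : List Int),
    ((A.zip m).foldl
      (fun (s : List Int × Int) am =>
        (s.1 ++ [PySem.Int.mod (s.2 * am.1) am.2], s.2 * am.1)) (acc, p)).1 =
    acc ++ (List.range A.length).map (fun i => PySem.Int.mod (p * prefProd A i) (m.getD i 0)) := by
  induction A with
  | nil => intro m _ p acc; simp
  | cons a A' ih =>
    intro m hlen p acc
    cases m with
    | nil => simp at hlen
    | cons mi m' =>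
      simp only [List.zip_cons_cons, List.foldl_cons]
      rw [ih m' (by simpa using hlen) (p * a) (acc ++ [PySem.Int.mod (p * a) mi])]
      rw [List.length_cons, List.range_succ_eq_map, List.map_cons, List.map_map]
      simp only [List.append_assoc, List.cons_append, List.nil_append]
      congr 2
      · simp [prefProd]
      · apply List.map_congr_left
        intro i _
        simp [prefProd, mul_assoc]

lemma alt_char (A m : List Int) (hlen : A.length = m.length) :
    remainder_tree_alt A m =
      (List.range A.length).map (fun i => PySem.Int.mod (1 * prefProd A i) (m.getD i 0)) := by
  show ((A.zip m).foldl
      (fun (s : List Int × Int) am =>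
        (s.1 ++ [PySem.Int.mod (s.2 * am.1) am.2], s.2 * am.1)) ([], 1)).1 = _
  exact alt_go A m hlen 1 []

-- ===== VERDICT (by name: the statement is the Claim_ definition above) =====
theorem remainder_tree_spec : Claim_equal_remainder_tree := by
  intro A m _ hPre
  obtain ⟨hlen, hnz⟩ := hPre
  unfold Spec_remainder_tree
  rw [a_char A.length A m rfl hlen.symm hnz, alt_char A m hlen]
  simp
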